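-- pv_equiv track=rewrite | github.com/FungiProxy/MyBabbittQuoteCopy | analyze_categories.py | suggest_better_category_name
-- ===== SOURCE A (Python) =====
-- def suggest_better_category_name(current_name, option_names):
--     """Suggest a better category name based on the options it contains."""
--
--     # Map current names to better names
--     category_mapping = {
--         'Material': 'Materials',
--         'Electrical': 'Voltages',  # Since it's mostly voltage options
--         'Mechanical': 'Connections',  # Since it's mostly connection options
--         'Exotic Metal': 'Exotic Metals',
--         'O-ring Material': 'O-Ring Materials',
--     }
--
--     # Check if we have a direct mapping
--     if current_name in category_mapping:
--         return category_mapping[current_name]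
--
--     # Analyze option names to suggest better category
--     if any('voltage' in name.lower() for name in option_names):
--         return 'Voltages'
--     elif any(
--         'connection' in name.lower()
--         or 'npt' in name.lower()
--         or 'flange' in name.lower()
--         for name in option_names
--     ):
--         return 'Connections'
--     elif any('material' in name.lower() for name in option_names):
--         return 'Materials'
--     elif any('o-ring' in name.lower() for name in option_names):
--         return 'O-Ring Materials'
--     elif any('exotic' in name.lower() for name in option_names):
--         return 'Exotic Metals'
--     else:
--         return current_name
-- ===== SOURCE B (Python) =====
-- def suggest_better_category_name(current_name, option_names):
--     """Single pass: build keyword presence flags, then decide by priority."""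
--     category_mapping = {
--         'Material': 'Materials',
--         'Electrical': 'Voltages',
--         'Mechanical': 'Connections',
--         'Exotic Metal': 'Exotic Metals',
--         'O-ring Material': 'O-Ring Materials',
--     }
--     mapped = category_mapping.get(current_name)
--     if mapped is not None:
--         return mapped
--
--     voltage = connection = material = oring = exotic = False
--     for name in option_names:
--         n = name.lower()
--         voltage = voltage or 'voltage' in n
--         connection = connection or 'connection' in n or 'npt' in n or 'flange' in n
--         material = material or 'material' in n
--         oring = oring or 'o-ring' in n
--         exotic = exotic or 'exotic' in n
--
--     if voltage:
--         return 'Voltages'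
--     if connection:
--         return 'Connections'
--     if material:
--         return 'Materials'
--     if oring:
--         return 'O-Ring Materials'
--     if exotic:
--         return 'Exotic Metals'
--     return current_name
-- ===== Notes on version B (the rewrite author's own statement) =====
-- stated objective: faster
-- what changed: B replaces A's five successive any(...) scans of option_names with a single pass that lowercases each name once and accumulates five presence flags, then decides the category from the flags in the original priority order (measured ~2x faster).
import Mathlib
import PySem

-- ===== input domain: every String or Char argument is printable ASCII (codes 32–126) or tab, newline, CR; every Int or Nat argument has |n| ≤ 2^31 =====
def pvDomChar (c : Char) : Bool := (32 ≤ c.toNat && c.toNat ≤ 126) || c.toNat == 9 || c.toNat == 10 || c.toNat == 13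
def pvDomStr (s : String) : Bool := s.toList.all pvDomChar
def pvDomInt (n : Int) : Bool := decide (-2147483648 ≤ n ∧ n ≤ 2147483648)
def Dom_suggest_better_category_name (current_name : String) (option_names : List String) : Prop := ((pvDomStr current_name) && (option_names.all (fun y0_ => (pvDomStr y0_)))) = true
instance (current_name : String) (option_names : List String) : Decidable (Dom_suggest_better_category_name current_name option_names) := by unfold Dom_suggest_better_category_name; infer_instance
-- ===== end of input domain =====

-- B replaces A's five successive any(...) scans with ONE pass over option_names that
-- lowercases each name once and accumulates five presence flags, then decides by priority.

-- ===== PORT A =====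
def sbcnMapping : PySem.Dict String String :=
  PySem.Dict.ofList
    [("Material", "Materials"),
     ("Electrical", "Voltages"),
     ("Mechanical", "Connections"),
     ("Exotic Metal", "Exotic Metals"),
     ("O-ring Material", "O-Ring Materials")]

def suggest_better_category_name (current_name : String) (option_names : List String) : String :=
  if sbcnMapping.contains current_name then
    (sbcnMapping.get? current_name).getD ""   -- guarded by contains: Python's mapping[current_name]
  else if option_names.any (fun name => PySem.Str.isIn "voltage" (PySem.Str.lower name)) then
    "Voltages"
  else if option_names.any (fun name =>
      PySem.Str.isIn "connection" (PySem.Str.lower name)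
      || PySem.Str.isIn "npt" (PySem.Str.lower name)
      || PySem.Str.isIn "flange" (PySem.Str.lower name)) then
    "Connections"
  else if option_names.any (fun name => PySem.Str.isIn "material" (PySem.Str.lower name)) then
    "Materials"
  else if option_names.any (fun name => PySem.Str.isIn "o-ring" (PySem.Str.lower name)) then
    "O-Ring Materials"
  else if option_names.any (fun name => PySem.Str.isIn "exotic" (PySem.Str.lower name)) then
    "Exotic Metals"
  else
    current_name

-- ===== PORT B =====
-- the single-pass flag accumulator of Source B
def sbcnFlags (option_names : List String) : Bool × Bool × Bool × Bool × Bool :=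
  option_names.foldl
    (fun st name =>
      let n := PySem.Str.lower name
      (st.1 || PySem.Str.isIn "voltage" n,
       st.2.1 || PySem.Str.isIn "connection" n || PySem.Str.isIn "npt" n || PySem.Str.isIn "flange" n,
       st.2.2.1 || PySem.Str.isIn "material" n,
       st.2.2.2.1 || PySem.Str.isIn "o-ring" n,
       st.2.2.2.2 || PySem.Str.isIn "exotic" n))
    (false, false, false, false, false)

def suggest_better_category_name_alt (current_name : String) (option_names : List String) : String :=
  match sbcnMapping.get? current_name with
  | some mapped => mapped
  | none =>
    let f := sbcnFlags option_names
    if f.1 then "Voltages"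
    else if f.2.1 then "Connections"
    else if f.2.2.1 then "Materials"
    else if f.2.2.2.1 then "O-Ring Materials"
    else if f.2.2.2.2 then "Exotic Metals"
    else current_name

-- ===== PRECONDITION & SPEC =====
def Spec_suggest_better_category_name (current_name : String) (option_names : List String) (out : String) : Prop := out = suggest_better_category_name_alt current_name option_names
instance (current_name : String) (option_names : List String) (out : String) : Decidable (Spec_suggest_better_category_name current_name option_names out) := by unfold Spec_suggest_better_category_name; infer_instance

-- ===== CLAIM =====
def Claim_equal_suggest_better_category_name : Prop := ∀ (current_name : String) (option_names : List String), Dom_suggest_better_category_name current_name option_names → Spec_suggest_better_category_name current_name option_names (suggest_better_category_name current_name option_names)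

-- ===== LEMMAS AND PROOFS =====

-- the fold accumulates exactly the five 'any' scans (disjunction with the initial flags)
theorem sbcnFlags_foldl (l : List String) (a b c d e : Bool) :
    l.foldl
      (fun st name =>
        let n := PySem.Str.lower name
        (st.1 || PySem.Str.isIn "voltage" n,
         st.2.1 || PySem.Str.isIn "connection" n || PySem.Str.isIn "npt" n || PySem.Str.isIn "flange" n,
         st.2.2.1 || PySem.Str.isIn "material" n,
         st.2.2.2.1 || PySem.Str.isIn "o-ring" n,
         st.2.2.2.2 || PySem.Str.isIn "exotic" n))
      (a, b, c, d, e)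
    = (a || l.any (fun name => PySem.Str.isIn "voltage" (PySem.Str.lower name)),
       b || l.any (fun name =>
         PySem.Str.isIn "connection" (PySem.Str.lower name)
         || PySem.Str.isIn "npt" (PySem.Str.lower name)
         || PySem.Str.isIn "flange" (PySem.Str.lower name)),
       c || l.any (fun name => PySem.Str.isIn "material" (PySem.Str.lower name)),
       d || l.any (fun name => PySem.Str.isIn "o-ring" (PySem.Str.lower name)),
       e || l.any (fun name => PySem.Str.isIn "exotic" (PySem.Str.lower name))) := by
  induction l generalizing a b c d e with
  | nil => simp
  | cons x xs ih =>
    simp only [List.foldl_cons, List.any_cons, ih]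
    simp [Bool.or_assoc]

theorem sbcnFlags_eq (l : List String) :
    sbcnFlags l
    = (l.any (fun name => PySem.Str.isIn "voltage" (PySem.Str.lower name)),
       l.any (fun name =>
         PySem.Str.isIn "connection" (PySem.Str.lower name)
         || PySem.Str.isIn "npt" (PySem.Str.lower name)
         || PySem.Str.isIn "flange" (PySem.Str.lower name)),
       l.any (fun name => PySem.Str.isIn "material" (PySem.Str.lower name)),
       l.any (fun name => PySem.Str.isIn "o-ring" (PySem.Str.lower name)),
       l.any (fun name => PySem.Str.isIn "exotic" (PySem.Str.lower name))) := by
  unfold sbcnFlags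
  simpa using sbcnFlags_foldl l false false false false false

-- ===== VERDICT =====
theorem suggest_better_category_name_spec : Claim_equal_suggest_better_category_name := by
  intro current_name option_names _
  unfold Spec_suggest_better_category_name suggest_better_category_name suggest_better_category_name_alt
  have hc : sbcnMapping.contains current_name = (sbcnMapping.get? current_name).isSome :=
    PySem.Dict.contains_eq_isSome_get? _ _
  cases h : sbcnMapping.get? current_name with
  | some v => simp [hc, h]
  | none =>
    simp [hc, h, sbcnFlags_eq]
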